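-- pv_equiv track=rewrite | github.com/Mdixit/Hackerrank | algorithms/substr.py | func
-- ===== SOURCE A (Python) =====
-- def func(iplst):  #right solution but timed out and gave segmentation error for few test cases.
--     tab = [[]]
--     templst = []
--     temp = 0
--     tot = 0
--     tab[0] = iplst
--     for i in range(2,(len(iplst)+1)):
--         for j in range(1,(len(iplst)+2)-i):
--             temp = tab[i-2][j-1] * 10
--             temp += iplst[j+i-2]
--             templst.append(temp)
--
--         tab.append(templst)
--         templst = []
--     for k in range(len(tab)):
--         tot += sum(tab[k])
--     return tot
-- ===== SOURCE B (Python) =====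
-- def func(iplst):
--     # Linear DP: run = sum of values of all substrings ending at i; accumulate.
--     run = 0
--     tot = 0
--     for i, d in enumerate(iplst):
--         run = run * 10 + (i + 1) * d
--         tot += run
--     return tot
-- ===== Notes on version B (the rewrite author's own statement) =====
-- stated objective: faster
-- what changed: Replaced the quadratic table of all substring values (built row by row and then summed) with a single left-to-right pass keeping one running sum run = sum of values of substrings ending at i (run = run*10 + (i+1)*digit) and accumulating it into the total.
import Mathlib
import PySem

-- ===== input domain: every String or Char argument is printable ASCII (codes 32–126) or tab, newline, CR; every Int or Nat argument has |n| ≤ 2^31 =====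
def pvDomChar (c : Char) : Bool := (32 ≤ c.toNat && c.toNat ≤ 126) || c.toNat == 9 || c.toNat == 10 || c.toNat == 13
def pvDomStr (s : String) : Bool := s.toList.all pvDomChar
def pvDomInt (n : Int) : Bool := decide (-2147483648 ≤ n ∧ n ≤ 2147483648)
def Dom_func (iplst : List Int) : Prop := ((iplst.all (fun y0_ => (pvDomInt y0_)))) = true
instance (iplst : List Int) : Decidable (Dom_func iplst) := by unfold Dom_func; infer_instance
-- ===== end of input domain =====

-- B replaces A's quadratic table of substring values by a single linear running-sum pass (objective: faster).

-- ===== PORT A =====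
-- Literal port of A: builds tab, row by row (row i-1 holds the values of all length-i
-- substrings), then sums every row.  All pyGetD indices are in range on every input,
-- so the default 0 / [] is never produced.
def func (iplst : List Int) : Int :=
  let tab := (PySem.List.pyRange 2 ((iplst.length : Int) + 1) 1).foldl
    (fun tab i =>
      tab ++ [(PySem.List.pyRange 1 ((iplst.length : Int) + 2 - i) 1).foldl
        (fun templst j =>
          templst ++ [PySem.List.pyGetD (PySem.List.pyGetD tab (i - 2) []) (j - 1) 0 * 10
                      + PySem.List.pyGetD iplst (j + i - 2) 0]) []])
    [iplst]
  tab.foldl (fun tot row => tot + row.sum) 0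

-- ===== PORT B =====
-- Literal port of B: one pass; run = sum of the values of all substrings ending at i.
def func_alt (iplst : List Int) : Int :=
  ((PySem.List.enumerate iplst 0).foldl
    (fun (s : Int × Int) p =>
      let run := s.1 * 10 + (p.1 + 1) * p.2
      (run, s.2 + run)) (0, 0)).2

-- ===== PRECONDITION & SPEC =====
def Spec_func (iplst : List Int) (out : Int) : Prop := out = func_alt iplst
instance (iplst : List Int) (out : Int) : Decidable (Spec_func iplst out) := by unfold Spec_func; infer_instance

-- ===== CLAIM (what is proved, stated in full; the proofs are below) =====
def Claim_equal_func : Prop := ∀ (iplst : List Int), Dom_func iplst → Spec_func iplst (func iplst)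

-- ===== LEMMAS AND PROOFS =====

-- value of the substring of xs starting at k, of length r+1 (0 past the end)
def pvV (xs : List Int) (k r : Nat) : Int :=
  ((xs.drop k).take (r+1)).foldl (fun a d => a * 10 + d) 0

-- row r of A's table: values of all substrings of length r+1
def pvRow (xs : List Int) (r : Nat) : List Int :=
  (List.range (xs.length - r)).map (fun k => pvV xs k r)

-- B's running sum after n elements: values of all substrings ending at index n-1
def pvR (xs : List Int) (n : Nat) : Int :=
  ((List.range n).map (fun r => pvV xs (n-1-r) r)).sum

-- B's total after n elements
def pvT (xs : List Int) (n : Nat) : Int :=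
  ((List.range n).map (fun i => pvR xs (i+1))).sum

lemma pvV_zero (xs : List Int) (k : Nat) : pvV xs k 0 = xs.getD k 0 := by
  cases e : xs.drop k with
  | nil =>
      have : xs.length ≤ k := by
        have := congrArg List.length e; simp at this; omega
      simp [pvV, e, List.getD_eq_getElem?_getD, List.getElem?_eq_none this]
  | cons a t =>
      have h0 : xs[k]? = some a := by
        have h : (xs.drop k)[0]? = xs[k+0]? := List.getElem?_drop
        rw [e] at h; simpa using h.symm
      simp [pvV, e, List.getD_eq_getElem?_getD, h0]

lemma pvV_succ (xs : List Int) (k r : Nat) (h : k + r + 1 < xs.length) :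
    pvV xs k (r+1) = pvV xs k r * 10 + xs.getD (k+r+1) 0 := by
  have hd : (xs.drop k)[r+1]? = some xs[k+r+1] := by
    rw [List.getElem?_drop]
    exact List.getElem?_eq_getElem (by omega)
  show ((xs.drop k).take (r+1+1)).foldl (fun a d => a * 10 + d) 0 = _
  rw [List.take_add_one, hd]
  simp [pvV, List.foldl_append, List.getD_eq_getElem?_getD,
        List.getElem?_eq_getElem h]

lemma pvRow_zero (xs : List Int) : pvRow xs 0 = xs := by
  apply List.ext_getElem
  · simp [pvRow]
  · intro i h1 h2
    simp only [pvRow, List.getElem_map, List.getElem_range]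
    rw [pvV_zero]
    simp [List.getD_eq_getElem?_getD, List.getElem?_eq_getElem h2]

-- A's table after processing i = 2 .. 2+M-1 (i.e. M outer iterations) is rows 0..M
lemma pv_tab_inv (xs : List Int) (M : Nat) (hM : M + 1 ≤ xs.length) :
    ((PySem.List.pyRange 2 (2 + (M:Int)) 1).foldl
      (fun tab i =>
        tab ++ [(PySem.List.pyRange 1 ((xs.length : Int) + 2 - i) 1).foldl
          (fun templst j =>
            templst ++ [PySem.List.pyGetD (PySem.List.pyGetD tab (i - 2) []) (j - 1) 0 * 10
                        + PySem.List.pyGetD xs (j + i - 2) 0]) []])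
      [xs])
    = (List.range (M+1)).map (pvRow xs) := by
  induction M with
  | zero =>
      rw [show (2 + (0:Nat) : Int) = 2 by norm_num, PySem.List.pyRange_one_eq_nil (le_refl 2)]
      simp [pvRow_zero]
  | succ m ih =>
      have hm : m + 1 ≤ xs.length := by omega
      have hsplit : PySem.List.pyRange 2 (2 + ((m+1:Nat):Int)) 1
          = PySem.List.pyRange 2 (2 + (m:Int)) 1 ++ [2 + (m:Int)] := by
        have := PySem.List.pyRange_one_succ_right (a := 2) (b := 2 + (m:Int)) (by omega)
        rw [show (2 + ((m+1:Nat):Int)) = 2 + (m:Int) + 1 by push_cast; ring]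
        exact this
      rw [hsplit, List.foldl_append, ih hm]
      simp only [List.foldl_cons, List.foldl_nil]
      -- the freshly appended row equals pvRow xs (m+1)
      have hidx : (2 + (m:Int) - 2) = ((m:Nat):Int) := by ring
      have htab : PySem.List.pyGetD ((List.range (m+1)).map (pvRow xs)) ((m:Nat):Int) [] = pvRow xs m := by
        rw [PySem.List.pyGetD_natCast]
        exact PySem.List.getD_map_range (pvRow xs) (m+1) m [] (by omega)
      have hb : ((xs.length : Int) + 2 - (2 + (m:Int))) = (((xs.length - m : Nat)):Int) := by
        push_cast [Nat.cast_sub (by omega : m ≤ xs.length)]; ring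
      rw [hidx, htab, hb, PySem.List.foldl_append_singleton_eq_map, List.nil_append,
          PySem.List.pyRange_one]
      rw [List.map_map]
      have hlen : ((((xs.length - m : Nat)):Int) - 1).toNat = xs.length - (m+1) := by omega
      rw [hlen]
      have hrow : (List.range (xs.length - (m+1))).map
            ((fun j => PySem.List.pyGetD (pvRow xs m) (j - 1) 0 * 10
                        + PySem.List.pyGetD xs (j + (2 + (m:Int)) - 2) 0) ∘ (fun k : Nat => 1 + (k:Int)))
          = pvRow xs (m+1) := by
        rw [pvRow]
        apply List.map_congr_left
        intro k hk
        have hk' : k < xs.length - (m+1) := List.mem_range.mp hk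
        have e1 : (1 + (k:Int) - 1) = ((k:Nat):Int) := by ring
        have e2 : (1 + (k:Int) + (2 + (m:Int)) - 2) = (((k + m + 1 : Nat)):Int) := by push_cast; ring
        simp only [Function.comp_apply, e1, e2, PySem.List.pyGetD_natCast]
        rw [PySem.List.getD_map_range _ _ _ _ (by omega : k < xs.length - m),
            ← pvV_succ xs k m (by omega)]
      rw [hrow]
      simp [List.range_succ]

-- generic double-sum swap: sum by rows (length) = sum by columns (end position)
lemma pvSwap (W : Nat → Nat → Int) (m : Nat) :
    ((List.range m).map (fun r => ((List.range (m-r)).map (fun k => W k r)).sum)).sum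
    = ((List.range m).map (fun i => ((List.range (i+1)).map (fun r => W (i-r) r)).sum)).sum := by
  induction m with
  | zero => simp
  | succ m ih =>
      rw [List.range_succ]
      simp only [List.map_append, List.sum_append, List.map_cons, List.map_nil,
        List.sum_cons, List.sum_nil]
      have h1 : (List.range m).map (fun r => ((List.range (m+1-r)).map (fun k => W k r)).sum)
          = (List.range m).map (fun r => ((List.range (m-r)).map (fun k => W k r)).sum + W (m-r) r) := by
        apply List.map_congr_left
        intro r hr
        have hr' : r < m := List.mem_range.mp hr
        rw [show m+1-r = (m-r)+1 by omega, List.range_succ]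
        simp
      rw [h1, PySem.List.sum_map_add_int, ih]
      have h2 : m+1-m = 1 := by omega
      rw [h2]
      simp [List.range_succ]
      ring

-- A's port computes the row-by-row sum
lemma pv_funcA (xs : List Int) (hL : 1 ≤ xs.length) :
    func xs = ((List.range xs.length).map (fun r => (pvRow xs r).sum)).sum := by
  unfold func
  have hb : ((xs.length : Int) + 1) = 2 + ((xs.length - 1 : Nat) : Int) := by
    push_cast [Nat.cast_sub hL]; ring
  rw [hb, pv_tab_inv xs (xs.length - 1) (by omega),
      show xs.length - 1 + 1 = xs.length by omega]
  rw [PySem.List.foldl_add ((List.range xs.length).map (pvRow xs)) List.sum 0]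
  simp [List.map_map, Function.comp_def]

lemma pvR_succ (xs : List Int) (n : Nat) (hn : n < xs.length) :
    pvR xs (n+1) = pvR xs n * 10 + ((n:Int) + 1) * xs.getD n 0 := by
  unfold pvR
  rw [show n+1-1 = n by omega]
  rw [List.range_succ_eq_map]
  simp only [List.map_cons, List.sum_cons, List.map_map]
  rw [pvV_zero]
  have h1 : (List.range n).map ((fun r => pvV xs (n-r) r) ∘ Nat.succ)
      = (List.range n).map (fun r => pvV xs (n-1-r) r * 10 + xs.getD n 0) := by
    apply List.map_congr_left
    intro r hr
    have hr' : r < n := List.mem_range.mp hr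
    have : pvV xs (n-(r+1)) (r+1) = pvV xs (n-(r+1)) r * 10 + xs.getD ((n-(r+1))+r+1) 0 :=
      pvV_succ xs (n-(r+1)) r (by omega)
    simp only [Function.comp_apply, Nat.succ_eq_add_one, this]
    rw [show (n-(r+1))+r+1 = n by omega, show n-(r+1) = n-1-r by omega]
  rw [h1, PySem.List.sum_map_add_int, PySem.List.sum_map_const_int, List.length_range,
      List.sum_map_mul_right]
  simp only [Nat.sub_zero]
  ring

lemma pv_enum_append (l1 l2 : List Int) (s : Int) :
    PySem.List.enumerate (l1 ++ l2) s
      = PySem.List.enumerate l1 s ++ PySem.List.enumerate l2 (s + l1.length) := by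
  induction l1 generalizing s with
  | nil => simp [PySem.List.enumerate_nil]
  | cons a t ih =>
      rw [List.cons_append, PySem.List.enumerate_cons, PySem.List.enumerate_cons, ih]
      simp only [List.cons_append, List.length_cons]
      have : s + 1 + (t.length : Int) = s + (((t.length + 1 : Nat)) : Int) := by push_cast; ring
      rw [this]

-- B's fold invariant on prefixes
lemma pv_funcB_inv (xs : List Int) (n : Nat) (hn : n ≤ xs.length) :
    (PySem.List.enumerate (xs.take n) 0).foldl
      (fun (s : Int × Int) p =>
        let run := s.1 * 10 + (p.1 + 1) * p.2
        (run, s.2 + run)) (0, 0)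
    = (pvR xs n, pvT xs n) := by
  induction n with
  | zero => simp [PySem.List.enumerate_nil, pvR, pvT]
  | succ m ih =>
      have hm : m < xs.length := by omega
      have htake : xs.take (m+1) = xs.take m ++ [xs[m]] := by
        rw [List.take_add_one, List.getElem?_eq_getElem hm]; rfl
      rw [htake, pv_enum_append, List.foldl_append, ih (by omega)]
      have hlen : (xs.take m).length = m := by simp [hm.le]
      rw [hlen, PySem.List.enumerate_cons, PySem.List.enumerate_nil]
      simp only [List.foldl_cons, List.foldl_nil, zero_add]
      have hR := pvR_succ xs m hm
      have hg : xs.getD m 0 = xs[m] := by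
        simp [List.getD_eq_getElem?_getD, List.getElem?_eq_getElem hm]
      rw [hg] at hR
      have hT : pvT xs (m+1) = pvT xs m + pvR xs (m+1) := by
        unfold pvT
        rw [List.range_succ]; simp
      rw [hT, hR]

lemma pv_funcB (xs : List Int) : func_alt xs = pvT xs xs.length := by
  unfold func_alt
  have h := pv_funcB_inv xs xs.length (le_refl _)
  rw [List.take_length] at h
  rw [h]

-- ===== VERDICT (by name: the statement is the Claim_ definition above) =====
theorem func_spec : Claim_equal_func := by
  intro xs _
  unfold Spec_func
  rcases Nat.eq_zero_or_pos xs.length with h0 | hpos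
  · have : xs = [] := List.length_eq_zero_iff.mp h0
    subst this; decide
  · rw [pv_funcA xs hpos, pv_funcB xs]
    have hrows : (fun r => (pvRow xs r).sum)
        = (fun r => ((List.range (xs.length - r)).map (fun k => pvV xs k r)).sum) := by
      funext r; rfl
    rw [hrows, pvSwap (pvV xs) xs.length]
    unfold pvT pvR
    apply congrArg
    apply List.map_congr_left
    intro i _
    apply congrArg
    apply List.map_congr_left
    intro r _
    rw [show i+1-1-r = i-r by omega]
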